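-- pv_equiv track=rewrite | github.com/simsang1l/Programmers | python/level3/다시보기/보석_쇼핑.py | solution
-- ===== SOURCE A (Python) =====
-- def solution(gems):
--     answer = []
--     # 모든 종류의 물품을 하나씩 구매한건지 어떻게 알까?
--     length = len(set(gems))
--     gem_length = len(gems)
--
--     # 진열대 길이
--     display_stand = 100001
--
--     # 가장 짧은 구간을 구하는 방법?
--     cnt_list = []
--     # 1. index 0 부터 length만큼의 물품을 구매하는데 얼마나 걸리는지 저장. index 0번이 끝나면 index 1번 조사
--     for i in range(gem_length) :
--         cnt = 1
--         tmp = set()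
--         tmp.add(gems[i])
--         for k in range(i, gem_length):
--             if gems[k] not in tmp :
--                 tmp.add(gems[k])
--                 cnt += 1
--
--             if len(tmp) == length and (k-i+2) < display_stand:
--                 display_stand = k-i+2
--                 cnt_list.append([k - i, i+1, k+1])
--                 break
--     cnt_list.sort(key = lambda x: (x[0], x[1]))
--
--     answer = cnt_list[0][1:]
--
--     return answer
-- ===== SOURCE B (Python) =====
-- def solution(gems):
--     total = len(set(gems))
--     last = {}          # gem type -> index of its last occurrence so far
--     best = None        # (window_length_minus_1, start_index), 0-based
--     for k, g in enumerate(gems):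
--         last[g] = k
--         if len(last) == total:
--             s = min(last.values())
--             cand = (k - s, s)
--             if best is None or cand < best:
--                 best = cand
--     return [best[1] + 1, best[0] + best[1] + 1]
-- ===== Notes on version B (the rewrite author's own statement) =====
-- stated objective: faster
-- what changed: A rescans a fresh set from every start index and finally sorts its candidate list; B makes one forward pass keeping each gem type's last-occurrence index in a dict and minimises over the per-end windows derived from min(last.values()).
import Mathlib
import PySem

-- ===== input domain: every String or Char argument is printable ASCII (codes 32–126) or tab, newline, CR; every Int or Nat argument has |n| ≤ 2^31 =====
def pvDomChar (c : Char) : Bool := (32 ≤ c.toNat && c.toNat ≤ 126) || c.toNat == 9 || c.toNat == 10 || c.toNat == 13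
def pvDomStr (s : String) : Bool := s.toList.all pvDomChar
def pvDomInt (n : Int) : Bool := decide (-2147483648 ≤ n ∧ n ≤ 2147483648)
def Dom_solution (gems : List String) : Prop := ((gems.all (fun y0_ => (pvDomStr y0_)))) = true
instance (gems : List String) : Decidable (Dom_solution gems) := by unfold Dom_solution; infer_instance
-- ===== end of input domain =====

-- B replaces A's quadratic per-start rescans by one forward pass that keeps each gem type's
-- last occurrence in a dict and minimises over per-end windows (objective: faster).

-- ===== PORT A =====
-- inner `for k in range(i, gem_length)` loop; returns (display_stand, cnt_list) at break / loop end
def solutionInner (gems : List String) (length : Int) (i : Int) (ks : List Int)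
    (cnt : Int) (tmp : PySem.Set String) (ds : Int) (cl : List (List Int)) :
    Int × List (List Int) :=
  match ks with
  | [] => (ds, cl)
  | k :: rest =>
    -- gems[k]: k is always in range here, so pyGetD is exact
    let g := PySem.List.pyGetD gems k ""
    let st := if ¬ (PySem.Set.contains tmp g) then (cnt + 1, PySem.Set.add tmp g)
              else (cnt, tmp)
    if PySem.Set.len st.2 = length ∧ k - i + 2 < ds then
      (k - i + 2, cl ++ [[k - i, i + 1, k + 1]])        -- update display_stand, append, break
    else
      solutionInner gems length i rest st.1 st.2 ds cl

-- outer `for i in range(gem_length)` loop, threading (display_stand, cnt_list)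
def solutionOuter (gems : List String) (length : Int) (istars : List Int)
    (ds : Int) (cl : List (List Int)) : Int × List (List Int) :=
  match istars with
  | [] => (ds, cl)
  | i :: rest =>
    let cnt : Int := 1
    let tmp := PySem.Set.add PySem.Set.empty (PySem.List.pyGetD gems i "")
    let r := solutionInner gems length i (PySem.List.pyRange i (gems.length : Int)) cnt tmp ds cl
    solutionOuter gems length rest r.1 r.2

def solution (gems : List String) : List Int :=
  let length : Int := PySem.Set.len (PySem.Set.ofList gems)
  let gem_length : Int := (gems.length : Int)
  let display_stand : Int := 100001
  let r := solutionOuter gems length (PySem.List.pyRange 0 gem_length) display_stand []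
  let cnt_list := PySem.List.sorted2 r.2 (fun x => PySem.List.pyGetD x 0 0) (fun x => PySem.List.pyGetD x 1 0)
  -- cnt_list[0][1:] — cnt_list[0] raises IndexError when cnt_list is empty; excluded by Pre_solution
  PySem.List.slice ((PySem.List.pyGet? cnt_list 0).getD []) (some 1) none

-- ===== PORT B =====
-- one pass over enumerate(gems): `last` maps each gem type to its last index so far;
-- whenever all types have been seen, the candidate window is (min(last.values()), k)
def solutionAltLoop (total : Int) (pairs : List (Int × String))
    (last : PySem.Dict String Int) (best : Option (Int × Int)) : Option (Int × Int) :=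
  match pairs with
  | [] => best
  | (k, g) :: rest =>
    let last' := last.insert g k
    let best' :=
      if (last'.size : Int) = total then
        match PySem.List.min? last'.values (fun v => v) with
        | some s =>
          let cand : Int × Int := (k - s, s)
          match best with
          | none => some cand
          | some b => if cand.1 < b.1 ∨ (cand.1 = b.1 ∧ cand.2 < b.2) then some cand else some b
        | none => best      -- unreachable: last' is nonempty here
      else best
    solutionAltLoop total rest last' best'

def solution_alt (gems : List String) : List Int :=
  let total : Int := PySem.Set.len (PySem.Set.ofList gems)
  match solutionAltLoop total (PySem.List.enumerate gems) PySem.Dict.empty none with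
  | some b => [b.2 + 1, b.1 + b.2 + 1]
  | none => []      -- Python raises here (only for gems = []); excluded by Pre_solution

-- ===== PRECONDITION & SPEC =====
-- Pre_ excludes the empty list (both programs raise) and lists whose shortest window containing
-- all gem types is longer than 99999 gems: there A's hard-coded display_stand = 100001 cap keeps
-- cnt_list empty and cnt_list[0] raises IndexError. Pre_solution holds exactly when A returns.
def Pre_solution (gems : List String) : Prop :=
  gems ≠ [] ∧ ∃ i ∈ List.range gems.length, ∀ g ∈ gems, g ∈ (gems.drop i).take 99999
instance (gems : List String) : Decidable (Pre_solution gems) := by unfold Pre_solution; infer_instance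

def pvWitness_solution : List String := (["a", "b", "a"])

def Spec_solution (gems : List String) (out : List Int) : Prop := out = solution_alt gems
instance (gems : List String) (out : List Int) : Decidable (Spec_solution gems out) := by unfold Spec_solution; infer_instance

-- ===== CLAIM (what is proved, stated in full; the proofs are below) =====
def Claim_equal_solution : Prop := ∀ (gems : List String), Dom_solution gems → Pre_solution gems → Spec_solution gems (solution gems)

-- ===== LEMMAS AND PROOFS =====

-- `covP gems i k`: the window gems[i..k] contains every gem type
def covP (gems : List String) (i k : Nat) : Prop :=
  ∀ g ∈ gems, ∃ t ∈ List.range (k + 1), i ≤ t ∧ gems[t]? = some g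

-- Bool twin (used inside computable helper definitions)
def covB (gems : List String) (i k : Nat) : Bool :=
  gems.all (fun g => (List.range (k + 1)).any (fun t => decide (i ≤ t ∧ gems[t]? = some g)))

theorem covB_iff (gems : List String) (i k : Nat) : covB gems i k = true ↔ covP gems i k := by
  unfold covB covP
  simp

theorem covP_anti_i {gems : List String} {i i' k : Nat} (h : covP gems i k) (hi : i' ≤ i) :
    covP gems i' k := by
  intro g hg
  obtain ⟨t, ht, hit, he⟩ := h g hg
  exact ⟨t, ht, by omega, he⟩

theorem covP_all {gems : List String} (hne : gems ≠ []) : covP gems 0 (gems.length - 1) := by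
  intro g hg
  obtain ⟨t, ht⟩ := List.mem_iff_getElem?.mp hg
  have hlt : t < gems.length := by
    rw [List.getElem?_eq_some_iff] at ht; exact ht.1
  have : 0 < gems.length := List.length_pos_iff.mpr hne
  exact ⟨t, by simp only [List.mem_range]; omega, by omega, ht⟩

theorem covP_not_of_lt {gems : List String} {i k : Nat} (hne : gems ≠ []) (hk : k < i) :
    ¬ covP gems i k := by
  intro h
  obtain ⟨g, hg⟩ := List.exists_mem_of_ne_nil gems hne
  obtain ⟨t, ht, hit, _⟩ := h g hg
  simp only [List.mem_range] at ht
  omega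

-- membership in the window list ↔ an occurrence index in [i, k]
theorem win_mem_iff {gems : List String} {i k : Nat} (hik : i ≤ k) (g : String) :
    g ∈ (gems.drop i).take (k + 1 - i) ↔ ∃ t ∈ List.range (k + 1), i ≤ t ∧ gems[t]? = some g := by
  constructor
  · intro hm
    obtain ⟨j, hj⟩ := List.mem_iff_getElem?.mp hm
    rw [List.getElem?_take] at hj
    by_cases hjk : j < k + 1 - i
    · rw [if_pos hjk, List.getElem?_drop] at hj
      exact ⟨i + j, by simp only [List.mem_range]; omega, by omega, hj⟩
    · rw [if_neg hjk] at hj; exact absurd hj (by simp)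
  · rintro ⟨t, ht, hit, he⟩
    simp only [List.mem_range] at ht
    apply List.mem_iff_getElem?.mpr
    refine ⟨t - i, ?_⟩
    rw [List.getElem?_take, if_pos (by omega), List.getElem?_drop]
    rwa [Nat.add_sub_cancel' hit]

-- a list of gems has as many distinct members as `gems` iff it contains every gem type
theorem size_eq_iff {gems w : List String} (hsub : ∀ a ∈ w, a ∈ gems) :
    (PySem.Set.ofList w).length = (PySem.Set.ofList gems).length ↔ ∀ g ∈ gems, g ∈ w := by
  have hnw := PySem.Set.nodup_ofList w
  have hng := PySem.Set.nodup_ofList gems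
  have hsub' : (PySem.Set.ofList w).toFinset ⊆ (PySem.Set.ofList gems).toFinset := by
    intro a ha
    simp only [List.mem_toFinset, PySem.Set.mem_ofList] at ha ⊢
    exact hsub a ha
  constructor
  · intro hlen g hg
    have hcard : (PySem.Set.ofList gems).toFinset.card ≤ (PySem.Set.ofList w).toFinset.card := by
      rw [List.toFinset_card_of_nodup hnw, List.toFinset_card_of_nodup hng, hlen]
    have := Finset.eq_of_subset_of_card_le hsub' hcard
    have hg' : g ∈ (PySem.Set.ofList w).toFinset := by
      rw [this]; simp only [List.mem_toFinset, PySem.Set.mem_ofList]; exact hg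
    simp only [List.mem_toFinset, PySem.Set.mem_ofList] at hg'
    exact hg'
  · intro hall
    have hsub2 : (PySem.Set.ofList gems).toFinset ⊆ (PySem.Set.ofList w).toFinset := by
      intro a ha
      simp only [List.mem_toFinset, PySem.Set.mem_ofList] at ha ⊢
      exact hall a ha
    have := Finset.Subset.antisymm hsub' hsub2
    rw [← List.toFinset_card_of_nodup hnw, ← List.toFinset_card_of_nodup hng, this]

-- find? over an index range: soundness, minimality, completeness
theorem find?_range'_some {p : Nat → Bool} : ∀ {m a x : Nat},
    (List.range' a m).find? p = some x →
    p x = true ∧ a ≤ x ∧ x < a + m ∧ ∀ y, a ≤ y → y < x → p y = false := by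
  intro m
  induction m with
  | zero => intro a x h; simp at h
  | succ m ih =>
    intro a x h
    rw [List.range'_succ, List.find?_cons] at h
    cases hpa : p a with
    | true =>
      rw [hpa] at h
      simp only [] at h
      cases h
      exact ⟨hpa, le_refl a, by omega, fun y h1 h2 => absurd (by omega : a ≤ y ∧ y < a) (by omega)⟩
    | false =>
      rw [hpa] at h
      simp only [] at h
      obtain ⟨h1, h2, h3, h4⟩ := ih h
      refine ⟨h1, by omega, by omega, fun y hy1 hy2 => ?_⟩
      rcases Nat.eq_or_lt_of_le hy1 with rfl | hlt
      · exact hpa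
      · exact h4 y (by omega) hy2

theorem find?_range'_exists {p : Nat → Bool} : ∀ {m a x : Nat},
    a ≤ x → x < a + m → p x = true → ∃ z, (List.range' a m).find? p = some z ∧ z ≤ x := by
  intro m
  induction m with
  | zero => intro a x h1 h2; omega
  | succ m ih =>
    intro a x h1 h2 hp
    rw [List.range'_succ, List.find?_cons]
    cases hpa : p a with
    | true => exact ⟨a, by simp only [], h1⟩
    | false =>
      simp only []
      have hax : a ≠ x := fun h => by rw [h, hp] at hpa; cases hpa
      obtain ⟨z, hz, hzx⟩ := ih (a := a + 1) (x := x) (by omega) (by omega) hp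
      exact ⟨z, hz, hzx⟩

-- `fA gems i`: the first k ≥ i whose window [i..k] covers all types (A's inner-loop break point)
def fA (gems : List String) (i : Nat) : Option Nat :=
  (List.range' i (gems.length - i)).find? (fun k => covB gems i k)

theorem fA_some {gems : List String} {i K : Nat} (hne : gems ≠ []) (h : fA gems i = some K) :
    i ≤ K ∧ K < gems.length ∧ covP gems i K ∧ ∀ j, j < K → ¬ covP gems i j := by
  obtain ⟨h1, h2, h3, h4⟩ := find?_range'_some h
  have hiK : i ≤ K := h2
  refine ⟨hiK, by omega, (covB_iff _ _ _).mp h1, fun j hj hc => ?_⟩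
  by_cases hij : i ≤ j
  · have := h4 j hij hj
    rw [← covB_iff gems i j, this] at hc
    exact absurd hc (by simp)
  · exact covP_not_of_lt hne (by omega) hc

theorem fA_of_cov {gems : List String} {i k : Nat} (h1 : i ≤ k) (h2 : k < gems.length)
    (hc : covP gems i k) : ∃ K, fA gems i = some K ∧ K ≤ k := by
  obtain ⟨z, hz, hzk⟩ :=
    find?_range'_exists (p := fun k => covB gems i k) (m := gems.length - i) (a := i) h1 (by omega) ((covB_iff _ _ _).mpr hc)
  exact ⟨z, hz, hzk⟩



-- the `tmp` set of A's inner loop just before step k (for a pass that started at i)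
def tmpAt (gems : List String) (i k : Nat) : PySem.Set String :=
  PySem.Set.ofList (PySem.List.pyGetD gems (i : Int) "" :: (gems.drop i).take (k - i))

theorem set_ofList_snoc {l : List String} {x : String} :
    PySem.Set.ofList (l ++ [x]) = PySem.Set.add (PySem.Set.ofList l) x := by
  rw [PySem.Set.ofList_eq_foldl, PySem.Set.ofList_eq_foldl, List.foldl_append]
  rfl

theorem getElem?_eq_pyGetD {gems : List String} {k : Nat} (hk : k < gems.length) :
    gems[k]? = some (PySem.List.pyGetD gems (k : Int) "") := by
  rw [PySem.List.pyGetD_natCast, List.getD_eq_getElem gems "" hk, List.getElem?_eq_getElem hk]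

theorem tmpAt_step {gems : List String} {i k : Nat} (hik : i ≤ k) (hk : k < gems.length) :
    PySem.Set.add (tmpAt gems i k) (PySem.List.pyGetD gems (k : Int) "") = tmpAt gems i (k + 1) := by
  unfold tmpAt
  rw [← set_ofList_snoc]
  congr 1
  have h1 : k + 1 - i = (k - i) + 1 := by omega
  rw [h1, List.take_add_one, List.getElem?_drop]
  have h2 : i + (k - i) = k := by omega
  rw [h2, getElem?_eq_pyGetD hk]
  simp

theorem tmpAt_size_iff {gems : List String} {i k : Nat} (hik : i ≤ k) (hk : k < gems.length) :
    (PySem.Set.len (tmpAt gems i (k + 1)) = PySem.Set.len (PySem.Set.ofList gems)) ↔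
      covP gems i k := by
  have hi : i < gems.length := by omega
  have hgi : gems[i]? = some (PySem.List.pyGetD gems (i : Int) "") := getElem?_eq_pyGetD hi
  have hsub : ∀ a ∈ (PySem.List.pyGetD gems (i : Int) "" :: (gems.drop i).take (k + 1 - i)), a ∈ gems := by
    intro a ha
    rcases List.mem_cons.mp ha with rfl | ha
    · exact List.mem_iff_getElem?.mpr ⟨i, hgi⟩
    · exact List.mem_of_mem_drop (List.mem_of_mem_take ha)
  have hmemi : PySem.List.pyGetD gems (i : Int) "" ∈ (gems.drop i).take (k + 1 - i) := by
    rw [win_mem_iff hik]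
    exact ⟨i, by simp only [List.mem_range]; omega, le_refl i, hgi⟩
  unfold tmpAt covP
  have h1 : k + 1 - i = (k + 1) - i := rfl
  rw [show PySem.Set.len (PySem.Set.ofList (PySem.List.pyGetD gems (i : Int) "" :: (gems.drop i).take (k + 1 - i))) =
      ((PySem.Set.ofList (PySem.List.pyGetD gems (i : Int) "" :: (gems.drop i).take (k + 1 - i))).length : Int) from rfl,
    show PySem.Set.len (PySem.Set.ofList gems) = ((PySem.Set.ofList gems).length : Int) from rfl,
    Nat.cast_inj]
  rw [size_eq_iff hsub]
  constructor
  · intro h g hg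
    rcases List.mem_cons.mp (h g hg) with rfl | hm
    · exact (win_mem_iff hik _).mp hmemi
    · exact (win_mem_iff hik g).mp hm
  · intro h g hg
    exact List.mem_cons_of_mem _ ((win_mem_iff hik g).mpr (h g hg))

-- A's inner loop once the display_stand can no longer be beaten: runs to the end untouched
theorem inner_tail (gems : List String) (D i : Int) :
    ∀ (m : Nat) (k : Int), k + m = gems.length →
      ∀ cnt tmp ds cl, ds ≤ k - i + 2 →
        solutionInner gems D i (PySem.List.pyRange k (gems.length : Int)) cnt tmp ds cl = (ds, cl) := by
  intro m
  induction m with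
  | zero =>
    intro k hk cnt tmp ds cl hds
    rw [PySem.List.pyRange_one_eq_nil (by omega)]
    rfl
  | succ m ih =>
    intro k hk cnt tmp ds cl hds
    rw [PySem.List.pyRange_one_cons (by omega)]
    simp only [solutionInner]
    rw [if_neg (by rintro ⟨_, h2⟩; omega)]
    exact ih (k + 1) (by omega) _ _ ds cl (by omega)

-- A's inner loop, running from position k of the pass that started at i
theorem inner_run {gems : List String} (hne : gems ≠ []) {i : Nat} (_ : i < gems.length) :
    ∀ (m k : Nat), i ≤ k → k + m = gems.length →
      (∀ j, j < k → ¬ covP gems i j) →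
      ∀ cnt ds cl,
        solutionInner gems (PySem.Set.len (PySem.Set.ofList gems)) (i : Int)
            (PySem.List.pyRange (k : Int) (gems.length : Int)) cnt (tmpAt gems i k) ds cl =
          match fA gems i with
          | some K => if (K : Int) - (i : Int) + 2 < ds then
              ((K : Int) - (i : Int) + 2, cl ++ [[(K : Int) - (i : Int), (i : Int) + 1, (K : Int) + 1]])
            else (ds, cl)
          | none => (ds, cl) := by
  intro m
  induction m with
  | zero =>
    intro k hik hk notyet cnt ds cl
    have hkn : k = gems.length := by omega
    subst hkn
    rw [PySem.List.pyRange_one_eq_nil (le_refl _)]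
    cases hfa : fA gems i with
    | none => rfl
    | some K =>
      exfalso
      obtain ⟨_, hKn, hKc, _⟩ := fA_some hne hfa
      exact notyet K hKn hKc
  | succ m ih =>
    intro k hik hk notyet cnt ds cl
    have hkn : k < gems.length := by omega
    rw [PySem.List.pyRange_one_cons (by exact_mod_cast hkn)]
    simp only [solutionInner]
    have hst : (if ¬ (PySem.Set.contains (tmpAt gems i k) (PySem.List.pyGetD gems (k : Int) "")) = true
        then (cnt + 1, PySem.Set.add (tmpAt gems i k) (PySem.List.pyGetD gems (k : Int) ""))
        else (cnt, tmpAt gems i k)).2 = tmpAt gems i (k + 1) := by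
      rw [← tmpAt_step hik hkn]
      by_cases hc : PySem.Set.contains (tmpAt gems i k) (PySem.List.pyGetD gems (k : Int) "") = true
      · rw [if_neg (not_not_intro hc)]
        show tmpAt gems i k = PySem.Set.add (tmpAt gems i k) (PySem.List.pyGetD gems (k : Int) "")
        unfold PySem.Set.add
        rw [if_pos hc]
      · rw [if_pos hc]
    rw [hst]
    by_cases hcov : covP gems i k
    · have hsz : PySem.Set.len (tmpAt gems i (k + 1)) = PySem.Set.len (PySem.Set.ofList gems) :=
        (tmpAt_size_iff hik hkn).mpr hcov
      have hfa : fA gems i = some k := by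
        obtain ⟨K, hK, hKle⟩ := fA_of_cov hik hkn hcov
        obtain ⟨hKi, hKn, hKc, hKmin⟩ := fA_some hne hK
        have hKk : K = k := by
          rcases Nat.lt_or_ge K k with h | h
          · exact absurd hKc (notyet K h)
          · omega
        rwa [hKk] at hK
      rw [hfa]
      dsimp only
      by_cases hds : (k : Int) - (i : Int) + 2 < ds
      · rw [if_pos ⟨hsz, hds⟩, if_pos hds]
      · rw [if_neg (by rintro ⟨_, h⟩; exact hds h), if_neg hds]
        exact inner_tail gems _ _ m ((k : Int) + 1) (by omega) _ _ ds cl (by omega)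
    · have hsz : ¬ PySem.Set.len (tmpAt gems i (k + 1)) = PySem.Set.len (PySem.Set.ofList gems) :=
        fun h => hcov ((tmpAt_size_iff hik hkn).mp h)
      rw [if_neg (by rintro ⟨h1, _⟩; exact hsz h1)]
      have hcast : ((k + 1 : Nat) : Int) = (k : Int) + 1 := by push_cast; omega
      rw [← hcast]
      refine ih (k + 1) (by omega) (by omega) ?_ _ ds cl
      intro j hj
      rcases Nat.lt_or_ge j k with h | h
      · exact notyet j h
      · have : j = k := by omega
        rwa [this]

-- abstract replay of A's outer loop: the (display_stand, appended entries) it produces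
-- from start index i with n - i starts left
def TTP (gems : List String) : Nat → Nat → Int → Int × List (List Int)
  | 0, _, ds => (ds, [])
  | f + 1, i, ds =>
    match fA gems i with
    | some K =>
      if (K : Int) - (i : Int) + 2 < ds then
        let r := TTP gems f (i + 1) ((K : Int) - (i : Int) + 2)
        (r.1, [(K : Int) - (i : Int), (i : Int) + 1, (K : Int) + 1] :: r.2)
      else TTP gems f (i + 1) ds
    | none => TTP gems f (i + 1) ds

theorem tmpAt_init (gems : List String) (i : Nat) :
    tmpAt gems i i = PySem.Set.add PySem.Set.empty (PySem.List.pyGetD gems (i : Int) "") := by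
  unfold tmpAt
  rw [Nat.sub_self, List.take_zero, PySem.Set.ofList_eq_foldl]
  rfl

theorem outer_run {gems : List String} (hne : gems ≠ []) :
    ∀ (f i : Nat), i + f = gems.length → ∀ ds cl,
      solutionOuter gems (PySem.Set.len (PySem.Set.ofList gems))
          (PySem.List.pyRange (i : Int) (gems.length : Int)) ds cl =
        ((TTP gems f i ds).1, cl ++ (TTP gems f i ds).2) := by
  intro f
  induction f with
  | zero =>
    intro i hi ds cl
    rw [PySem.List.pyRange_one_eq_nil (by omega)]
    simp [solutionOuter, TTP]
  | succ f ih =>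
    intro i hi ds cl
    have hilt : i < gems.length := by omega
    rw [PySem.List.pyRange_one_cons (by exact_mod_cast hilt)]
    simp only [solutionOuter]
    rw [← tmpAt_init gems i,
      inner_run hne hilt (f + 1) i (le_refl i) (by omega)
        (fun j hj => covP_not_of_lt hne hj) 1 ds cl]
    have hcast : ((i + 1 : Nat) : Int) = (i : Int) + 1 := by push_cast; ring
    cases hfa : fA gems i with
    | none =>
      dsimp only
      have ih' := ih (i + 1) (by omega) ds cl
      rw [hcast] at ih'
      rw [ih']
      simp only [TTP, hfa]
    | some K =>
      dsimp only
      by_cases hds : (K : Int) - (i : Int) + 2 < ds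
      · rw [if_pos hds]
        dsimp only
        have ih' := ih (i + 1) (by omega) ((K : Int) - (i : Int) + 2) (cl ++ [[(K : Int) - (i : Int), (i : Int) + 1, (K : Int) + 1]])
        rw [hcast] at ih'
        rw [ih']
        simp only [TTP, hfa]
        rw [if_pos hds]
        simp [List.append_assoc]
      · rw [if_neg hds]
        dsimp only
        have ih' := ih (i + 1) (by omega) ds cl
        rw [hcast] at ih'
        rw [ih']
        simp only [TTP, hfa]
        rw [if_neg hds]

theorem fA_none_of_ge {gems : List String} {j : Nat} (h : gems.length ≤ j) :
    fA gems j = none := by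
  unfold fA
  rw [Nat.sub_eq_zero_of_le h]
  rfl

theorem TTP_mem0 (gems : List String) :
    ∀ (f i : Nat) (ds : Int), ∀ e ∈ (TTP gems f i ds).2,
      PySem.List.pyGetD e 0 0 + 2 < ds := by
  intro f
  induction f with
  | zero => intro i ds e he; simp [TTP] at he
  | succ f ih =>
    intro i ds e he
    rw [TTP] at he
    cases hfa : fA gems i with
    | none => rw [hfa] at he; exact ih (i + 1) ds e he
    | some K =>
      rw [hfa] at he
      dsimp only at he
      by_cases hds : (K : Int) - (i : Int) + 2 < ds
      · rw [if_pos hds] at he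
        rcases List.mem_cons.mp he with rfl | he
        · show (K : Int) - (i : Int) + 2 < ds
          exact hds
        · exact lt_trans (ih (i + 1) _ e he) hds
      · rw [if_neg hds] at he
        exact ih (i + 1) ds e he

theorem TTP_pairwise (gems : List String) :
    ∀ (f i : Nat) (ds : Int),
      (TTP gems f i ds).2.Pairwise
        (fun a b => PySem.List.pyGetD b 0 0 < PySem.List.pyGetD a 0 0) := by
  intro f
  induction f with
  | zero => intro i ds; simp [TTP]
  | succ f ih =>
    intro i ds
    rw [TTP]
    cases hfa : fA gems i with
    | none => exact ih (i + 1) ds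
    | some K =>
      dsimp only
      by_cases hds : (K : Int) - (i : Int) + 2 < ds
      · rw [if_pos hds]
        refine List.pairwise_cons.mpr ⟨fun b hb => ?_, ih (i + 1) _⟩
        have := TTP_mem0 gems f (i + 1) ((K : Int) - (i : Int) + 2) b hb
        show PySem.List.pyGetD b 0 0 < PySem.List.pyGetD [(K : Int) - (i : Int), (i : Int) + 1, (K : Int) + 1] 0 0
        have hent : PySem.List.pyGetD [(K : Int) - (i : Int), (i : Int) + 1, (K : Int) + 1] 0 0 = (K : Int) - (i : Int) := rfl
        omega
      · rw [if_neg hds]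
        exact ih (i + 1) ds

theorem TTP_last {gems : List String} (hne : gems ≠ []) :
    ∀ (f i : Nat) (ds : Int), i + f = gems.length →
      ((TTP gems f i ds).2 = [] →
        ∀ j K, i ≤ j → fA gems j = some K → ¬ ((K : Int) - (j : Int) + 2 < ds))
      ∧ (∀ e, (TTP gems f i ds).2.getLast? = some e →
          ∃ j K, i ≤ j ∧ fA gems j = some K ∧ ((K : Int) - (j : Int) + 2 < ds) ∧
            e = [(K : Int) - (j : Int), (j : Int) + 1, (K : Int) + 1] ∧
            ∀ j' K', i ≤ j' → fA gems j' = some K' → ((K' : Int) - (j' : Int) + 2 < ds) →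
              (K - j < K' - j' ∨ (K - j = K' - j' ∧ j ≤ j'))) := by
  intro f
  induction f with
  | zero =>
    intro i ds hf
    constructor
    · intro _ j K hij hfaj
      rw [fA_none_of_ge (by omega)] at hfaj
      cases hfaj
    · intro e he; simp [TTP] at he
  | succ f ih =>
    intro i ds hf
    cases hfa : fA gems i with
    | none =>
      have heq : TTP gems (f + 1) i ds = TTP gems f (i + 1) ds := by
        rw [TTP, hfa]
      rw [heq]
      obtain ⟨ihE, ihL⟩ := ih (i + 1) ds (by omega)
      constructor
      · intro hnil j K hij hfaj
        rcases Nat.eq_or_lt_of_le hij with rfl | h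
        · rw [hfa] at hfaj; cases hfaj
        · exact ihE hnil j K (by omega) hfaj
      · intro e he
        obtain ⟨j, K, h1, h2, h3, h4, h5⟩ := ihL e he
        refine ⟨j, K, by omega, h2, h3, h4, fun j' K' hj' hfj' hds' => ?_⟩
        rcases Nat.eq_or_lt_of_le hj' with rfl | h
        · rw [hfa] at hfj'; cases hfj'
        · exact h5 j' K' (by omega) hfj' hds'
    | some K =>
      obtain ⟨hiK, hKn, _, _⟩ := fA_some hne hfa
      by_cases hds : (K : Int) - (i : Int) + 2 < ds
      · have heq : (TTP gems (f + 1) i ds).2 =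
            [(K : Int) - (i : Int), (i : Int) + 1, (K : Int) + 1] ::
              (TTP gems f (i + 1) ((K : Int) - (i : Int) + 2)).2 := by
          rw [TTP, hfa]
          dsimp only
          rw [if_pos hds]
        obtain ⟨ihE, ihL⟩ := ih (i + 1) ((K : Int) - (i : Int) + 2) (by omega)
        constructor
        · intro hnil; rw [heq] at hnil; cases hnil
        · intro e he
          rw [heq] at he
          cases htail : (TTP gems f (i + 1) ((K : Int) - (i : Int) + 2)).2 with
          | nil =>
            rw [htail] at he
            have he' : e = [(K : Int) - (i : Int), (i : Int) + 1, (K : Int) + 1] := by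
              rw [List.getLast?_singleton] at he
              exact (Option.some.injEq _ _).mp he.symm
            refine ⟨i, K, le_refl i, hfa, hds, he', ?_⟩
            intro j' K' hj' hfj' hds'
            rcases Nat.eq_or_lt_of_le hj' with rfl | hlt
            · rw [hfa] at hfj'
              have hKK : K' = K := (Option.some.injEq _ _).mp hfj'.symm
              subst hKK
              right; exact ⟨rfl, le_refl i⟩
            · have hno := ihE htail j' K' (by omega) hfj'
              obtain ⟨hjK', _, _, _⟩ := fA_some hne hfj'
              have hle : K - i ≤ K' - j' := by omega
              rcases Nat.lt_or_ge (K - i) (K' - j') with h | h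
              · exact Or.inl h
              · right; exact ⟨by omega, by omega⟩
          | cons x xs =>
            rw [htail, List.getLast?_cons_cons] at he
            obtain ⟨j, K₂, h1, h2, h3, h4, h5⟩ := ihL e (by rw [htail]; exact he)
            obtain ⟨hjK₂, _, _, _⟩ := fA_some hne h2
            refine ⟨j, K₂, by omega, h2, lt_trans h3 hds, h4, ?_⟩
            intro j' K' hj' hfj' hds'
            rcases Nat.eq_or_lt_of_le hj' with rfl | hlt
            · rw [hfa] at hfj'
              have hKK : K' = K := (Option.some.injEq _ _).mp hfj'.symm
              subst hKK
              left; omega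
            · by_cases hq : (K' : Int) - (j' : Int) + 2 < (K : Int) - (i : Int) + 2
              · exact h5 j' K' (by omega) hfj' hq
              · obtain ⟨hjK', _, _, _⟩ := fA_some hne hfj'
                left; omega
      · have heq : TTP gems (f + 1) i ds = TTP gems f (i + 1) ds := by
          rw [TTP, hfa]
          dsimp only
          rw [if_neg hds]
        rw [heq]
        obtain ⟨ihE, ihL⟩ := ih (i + 1) ds (by omega)
        constructor
        · intro hnil j K' hij hfaj
          rcases Nat.eq_or_lt_of_le hij with rfl | h
          · rw [hfa] at hfaj
            have : K' = K := (Option.some.injEq _ _).mp hfaj.symm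
            subst this
            exact hds
          · exact ihE hnil j K' (by omega) hfaj
        · intro e he
          obtain ⟨j, K₂, h1, h2, h3, h4, h5⟩ := ihL e he
          refine ⟨j, K₂, by omega, h2, h3, h4, fun j' K' hj' hfj' hds' => ?_⟩
          rcases Nat.eq_or_lt_of_le hj' with rfl | h
          · rw [hfa] at hfj'
            have : K' = K := (Option.some.injEq _ _).mp hfj'.symm
            subst this
            exact absurd hds' hds
          · exact h5 j' K' (by omega) hfj' hds'

-- the (length-1, start) pair of the best window: lexicographically least over all covering windows
def IsBest (gems : List String) (p : Nat × Nat) : Prop :=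
  (p.2 + p.1 < gems.length ∧ covP gems p.2 (p.2 + p.1)) ∧
  ∀ i k, i ≤ k → k < gems.length → covP gems i k → (p.1 < k - i ∨ (p.1 = k - i ∧ p.2 ≤ i))

-- Python's sort on a strictly key-decreasing list just reverses it
theorem sorted2_rev_of_pairwise (xs : List (List Int)) (k1 k2 : List Int → Int)
    (h : xs.Pairwise (fun a b => k1 b < k1 a)) :
    PySem.List.sorted2 xs k1 k2 = xs.reverse := by
  induction xs using List.reverseRecOn with
  | nil => rfl
  | append_singleton ys x ih =>
    obtain ⟨hys, _, hxy⟩ := List.pairwise_append.mp h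
    have hstep : PySem.List.sorted2 (ys ++ [x]) k1 k2 =
        PySem.List.insertBy
          (fun a b => decide (k1 a < k1 b) || (!decide (k1 b < k1 a) && decide (k2 a < k2 b)))
          x (PySem.List.sorted2 ys k1 k2) := by
      simp [PySem.List.sorted2, List.foldl_append]
    rw [hstep, ih hys, List.reverse_append]
    cases hrev : ys.reverse with
    | nil => simp [PySem.List.insertBy]
    | cons y t =>
      have hy : y ∈ ys := by
        have : y ∈ ys.reverse := by rw [hrev]; exact List.mem_cons_self
        exact List.mem_reverse.mp this
      have hlt : k1 x < k1 y := by
        have := hxy y hy x List.mem_cons_self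
        exact this
      simp [PySem.List.insertBy, hlt]

theorem solutionA_best (gems : List String) (hpre : Pre_solution gems) :
    ∃ p, IsBest gems p ∧ solution gems = [(p.2 : Int) + 1, (p.2 : Int) + (p.1 : Int) + 1] := by
  obtain ⟨hne, i₀, hi₀r, hwin⟩ := hpre
  have hi₀ : i₀ < gems.length := List.mem_range.mp hi₀r
  have hnpos : 0 < gems.length := by omega
  -- the window starting at i₀ covers all types within 99999 gems
  set Kw : Nat := min (i₀ + 99998) (gems.length - 1) with hKw
  have hcov₀ : covP gems i₀ Kw := by
    intro g hg
    obtain ⟨j, hj⟩ := List.mem_iff_getElem?.mp (hwin g hg)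
    rw [List.getElem?_take] at hj
    by_cases hj9 : j < 99999
    · rw [if_pos hj9, List.getElem?_drop] at hj
      have hjlen : i₀ + j < gems.length := (List.getElem?_eq_some_iff.mp hj).1
      exact ⟨i₀ + j, List.mem_range.mpr (by omega), by omega, hj⟩
    · rw [if_neg hj9] at hj; cases hj
  obtain ⟨K₀, hfa₀, hK₀le⟩ := fA_of_cov (by omega) (by omega) hcov₀
  have hqual₀ : (K₀ : Int) - (i₀ : Int) + 2 < 100001 := by
    have : K₀ ≤ i₀ + 99998 := by omega
    omega
  -- run A
  have houter := outer_run hne gems.length 0 (by omega) 100001 []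
  rw [show ((0 : Nat) : Int) = (0 : Int) from rfl] at houter
  obtain ⟨hE, hL⟩ := TTP_last hne gems.length 0 100001 (by omega)
  have hnonnil : (TTP gems gems.length 0 100001).2 ≠ [] := by
    intro hnil
    exact hE hnil i₀ K₀ (Nat.zero_le _) hfa₀ hqual₀
  obtain ⟨e, he⟩ : ∃ e, (TTP gems gems.length 0 100001).2.getLast? = some e := by
    cases hcase : (TTP gems gems.length 0 100001).2.getLast? with
    | none => exact absurd (List.getLast?_eq_none_iff.mp hcase) hnonnil
    | some e => exact ⟨e, rfl⟩
  obtain ⟨j, K, _, hfaj, hdsj, hee, hmin⟩ := hL e he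
  obtain ⟨hjK, hKn, hcovjK, _⟩ := fA_some hne hfaj
  refine ⟨(K - j, j), ⟨⟨by simp only; omega, ?_⟩, ?_⟩, ?_⟩
  · show covP gems j (j + (K - j))
    have : j + (K - j) = K := by omega
    rwa [this]
  · -- lexicographic minimality over all covering windows
    intro i k hik hkn hc
    obtain ⟨K'', hfa'', hK''le⟩ := fA_of_cov hik hkn hc
    obtain ⟨hiK'', _, _, _⟩ := fA_some hne hfa''
    by_cases hq : (K'' : Int) - (i : Int) + 2 < 100001
    · have := hmin i K'' (Nat.zero_le _) hfa'' hq
      simp only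
      omega
    · have h9 : 99999 ≤ K'' - i := by omega
      have := hmin i₀ K₀ (Nat.zero_le _) hfa₀ hqual₀
      have hsmall : K - j ≤ K₀ - i₀ := by omega
      have : K₀ - i₀ ≤ 99998 := by omega
      simp only
      omega
  · -- compute what A returns
    show solution gems = [(j : Int) + 1, (j : Int) + ((K - j : Nat) : Int) + 1]
    unfold solution
    dsimp only
    rw [houter]
    simp only [List.nil_append]
    rw [sorted2_rev_of_pairwise _ _ _ (TTP_pairwise gems gems.length 0 100001),
      PySem.List.pyGet?_zero,
      show (TTP gems gems.length 0 100001).2.reverse[0]? =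
          (TTP gems gems.length 0 100001).2.reverse.head? from List.head?_eq_getElem?.symm,
      List.head?_reverse, he]
    simp only [Option.getD_some]
    rw [hee, PySem.List.slice_from_one]
    have hcast : (K : Int) + 1 = (j : Int) + ((K - j : Nat) : Int) + 1 := by omega
    simp only [List.tail_cons]
    rw [hcast]


theorem length_eq_of_nodup_of_mem_iff {l₁ l₂ : List String} (h₁ : l₁.Nodup) (h₂ : l₂.Nodup)
    (h : ∀ a, a ∈ l₁ ↔ a ∈ l₂) : l₁.length = l₂.length := by
  rw [← List.toFinset_card_of_nodup h₁, ← List.toFinset_card_of_nodup h₂]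
  congr 1
  ext a
  simp only [List.mem_toFinset]
  exact h a

theorem covP_zero_iff_take {gems : List String} {m : Nat} :
    covP gems 0 m ↔ ∀ g ∈ gems, g ∈ gems.take (m + 1) := by
  constructor
  · intro h g hg
    have h2 := (win_mem_iff (gems := gems) (i := 0) (k := m) (Nat.zero_le m) g).mpr (h g hg)
    simpa using h2
  · intro h g hg
    exact (win_mem_iff (gems := gems) (i := 0) (k := m) (Nat.zero_le m) g).mp (by simpa using h g hg)

-- v is the index of the last occurrence of g among the first m gems
def IsLastOcc (gems : List String) (m : Nat) (g : String) (v : Int) : Prop :=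
  0 ≤ v ∧ v.toNat < m ∧ gems[v.toNat]? = some g ∧
    ∀ t : Nat, v.toNat < t → t < m → gems[t]? ≠ some g

-- invariant of B's `last` dict after the first m gems have been processed
def DInv (gems : List String) (m : Nat) (d : PySem.Dict String Int) : Prop :=
  (∀ g v, d.get? g = some v → IsLastOcc gems m g v) ∧
  d.keys.Nodup ∧
  (∀ g, d.contains g = true ↔ g ∈ gems.take m)

-- invariant of B's `best`: the lexicographically least window among those ending before m
def BInv (gems : List String) (m : Nat) (best : Option (Int × Int)) : Prop :=
  (best = none → ∀ k, k < m → ¬ covP gems 0 k) ∧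
  (∀ L s, best = some (L, s) → ∃ kk ss : Nat, L = (kk : Int) - (ss : Int) ∧ s = (ss : Int) ∧
    ss ≤ kk ∧ kk < m ∧ covP gems ss kk ∧
    ∀ i k, i ≤ k → k < m → covP gems i k → (kk - ss < k - i ∨ (kk - ss = k - i ∧ ss ≤ i)))

theorem dict_size_iff {gems : List String} {m : Nat}
    {d : PySem.Dict String Int} (hnd : d.keys.Nodup)
    (hcont : ∀ g, d.contains g = true ↔ g ∈ gems.take (m + 1)) :
    ((d.size : Int) = PySem.Set.len (PySem.Set.ofList gems)) ↔ covP gems 0 m := by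
  have hkeys : ∀ a, a ∈ d.keys ↔ a ∈ PySem.Set.ofList (gems.take (m + 1)) := by
    intro a
    rw [← PySem.Dict.contains_iff_mem_keys, hcont a, PySem.Set.mem_ofList]
  have hlen : d.keys.length = (PySem.Set.ofList (gems.take (m + 1))).length :=
    length_eq_of_nodup_of_mem_iff hnd (PySem.Set.nodup_ofList _) hkeys
  have hsub : ∀ a ∈ gems.take (m + 1), a ∈ gems := fun a ha => List.mem_of_mem_take ha
  have hsize : d.size = d.keys.length := by
    show d.items.length = d.keys.length
    simp [PySem.Dict.keys]
  rw [hsize, hlen,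
    show PySem.Set.len (PySem.Set.ofList gems) = ((PySem.Set.ofList gems).length : Int) from rfl,
    Nat.cast_inj, size_eq_iff hsub, covP_zero_iff_take]

theorem altloop_inv {gems : List String} :
    ∀ (suf : List String) (m : Nat) (d : PySem.Dict String Int) (best : Option (Int × Int)),
      m ≤ gems.length → gems.drop m = suf → DInv gems m d → BInv gems m best →
      BInv gems gems.length
        (solutionAltLoop (PySem.Set.len (PySem.Set.ofList gems))
          (PySem.List.enumerate suf (m : Int)) d best) := by
  intro suf
  induction suf with
  | nil =>
    intro m d best hm hdrop _ hB
    have : gems.length ≤ m := List.drop_eq_nil_iff.mp hdrop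
    have hmn : m = gems.length := by omega
    rw [PySem.List.enumerate_nil]
    show BInv gems gems.length best
    rwa [hmn] at hB
  | cons x rest ih =>
    intro m d best hm hdrop hD hB
    obtain ⟨hDlast, hDnd, hDcont⟩ := hD
    have hmlt : m < gems.length := by
      by_contra h
      rw [List.drop_eq_nil_iff.mpr (by omega)] at hdrop
      cases hdrop
    have hgm : gems[m]? = some x := by
      have h0 : (gems.drop m)[0]? = some x := by rw [hdrop]; rfl
      rwa [List.getElem?_drop, Nat.add_zero] at h0
    have hrest : gems.drop (m + 1) = rest := by
      have : gems.drop (m + 1) = (gems.drop m).drop 1 := by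
        rw [List.drop_drop, Nat.add_comm]
      rw [this, hdrop]
      rfl
    have htake : gems.take (m + 1) = gems.take m ++ [x] := by
      rw [List.take_add_one, hgm]
      rfl
    -- updated dict invariant
    have hD' : DInv gems (m + 1) (d.insert x (m : Int)) := by
      refine ⟨?_, PySem.Dict.nodup_keys_insert d x (m : Int) hDnd, ?_⟩
      · intro g v hget
        by_cases hgx : g = x
        · subst hgx
          rw [PySem.Dict.get?_insert_self] at hget
          have hv : v = (m : Int) := (Option.some.injEq _ _).mp hget.symm
          subst hv
          refine ⟨Int.natCast_nonneg m, by simp, by simpa using hgm, ?_⟩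
          intro t ht1 ht2
          simp at ht1 ht2
          omega
        · rw [PySem.Dict.get?_insert_of_ne d (m : Int) hgx] at hget
          obtain ⟨h1, h2, h3, h4⟩ := hDlast g v hget
          refine ⟨h1, by omega, h3, ?_⟩
          intro t ht1 ht2 hcontra
          rcases Nat.lt_or_ge t m with h | h
          · exact h4 t ht1 h hcontra
          · have htm : t = m := by omega
            rw [htm, hgm] at hcontra
            exact hgx ((Option.some.injEq _ _).mp hcontra.symm)
      · intro g
        rw [PySem.Dict.contains_insert, htake]
        simp only [List.mem_append, List.mem_singleton, Bool.or_eq_true, beq_iff_eq]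
        rw [hDcont g]
        tauto
    obtain ⟨hD'last, hD'nd, hD'cont⟩ := hD'
    -- unfold one loop step
    rw [PySem.List.enumerate_cons]
    show BInv gems gems.length
      (solutionAltLoop (PySem.Set.len (PySem.Set.ofList gems))
        (((m : Int), x) :: PySem.List.enumerate rest ((m : Int) + 1)) d best)
    simp only [solutionAltLoop]
    have hcast : ((m + 1 : Nat) : Int) = (m : Int) + 1 := by push_cast; ring
    by_cases hsz : (((d.insert x (m : Int)).size : Nat) : Int) = PySem.Set.len (PySem.Set.ofList gems)
    · -- all gem types seen: a candidate window ends at m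
      have hcov0 : covP gems 0 m := (dict_size_iff hD'nd hD'cont).mp hsz
      -- the minimum of the last-occurrence indices
      have hxmem : ((m : Int)) ∈ (d.insert x (m : Int)).values := by
        have hitems : (x, (m : Int)) ∈ (d.insert x (m : Int)).items :=
          (PySem.Dict.get?_eq_some_iff_mem_items _ _ _ hD'nd).mp (PySem.Dict.get?_insert_self d x (m : Int))
        exact List.mem_map.mpr ⟨(x, (m : Int)), hitems, rfl⟩
      have hvne : (d.insert x (m : Int)).values ≠ [] := by
        intro h
        rw [h] at hxmem
        cases hxmem
      obtain ⟨s, hs⟩ : ∃ s, PySem.List.min? (d.insert x (m : Int)).values (fun v => v) = some s := by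
        cases hcase : PySem.List.min? (d.insert x (m : Int)).values (fun v => v) with
        | none => exact absurd ((PySem.List.min?_eq_none_iff _ _).mp hcase) hvne
        | some s => exact ⟨s, rfl⟩
      have hsmem : s ∈ (d.insert x (m : Int)).values := PySem.List.min?_mem hs
      have hsmin : ∀ v ∈ (d.insert x (m : Int)).values, s ≤ v := by
        intro v hv
        exact PySem.List.min?_isMin hs v hv
      obtain ⟨⟨g₀, s'⟩, hg₀items, hg₀s⟩ := List.mem_map.mp hsmem
      rw [show s' = s from hg₀s] at hg₀items
      have hg₀get : (d.insert x (m : Int)).get? g₀ = some s :=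
        PySem.Dict.get?_of_mem_items _ hg₀items hD'nd
      obtain ⟨hs0, hstm, hsocc, hslast⟩ := hD'last g₀ s hg₀get
      -- every type's last occurrence is ≥ s, and it is in [s.toNat, m]
      have hvall : ∀ g v, (d.insert x (m : Int)).get? g = some v → s ≤ v ∧ IsLastOcc gems (m + 1) g v := by
        intro g v hget
        refine ⟨?_, hD'last g v hget⟩
        have : v ∈ (d.insert x (m : Int)).values := by
          have : (g, v) ∈ (d.insert x (m : Int)).items :=
            (PySem.Dict.get?_eq_some_iff_mem_items _ _ _ hD'nd).mp hget
          exact List.mem_map.mpr ⟨(g, v), this, rfl⟩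
        exact hsmin v this
      -- the candidate window [s.toNat, m] covers all types
      have hcovcand : covP gems s.toNat m := by
        intro g hg
        have hgt : g ∈ gems.take (m + 1) := covP_zero_iff_take.mp hcov0 g hg
        have hcg : (d.insert x (m : Int)).contains g = true := (hD'cont g).mpr hgt
        obtain ⟨v, hv⟩ : ∃ v, (d.insert x (m : Int)).get? g = some v := by
          cases hcase : (d.insert x (m : Int)).get? g with
          | none =>
            rw [PySem.Dict.get?_eq_none_iff_not_mem_keys] at hcase
            rw [PySem.Dict.contains_iff_mem_keys] at hcg
            exact absurd hcg hcase
          | some v => exact ⟨v, rfl⟩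
        obtain ⟨hsv, h1, h2, h3, _⟩ := hvall g v hv
        exact ⟨v.toNat, List.mem_range.mpr (by omega), by omega, h3⟩
      -- the candidate start is maximal among windows ending at m
      have hcandmax : ∀ i, i ≤ m → covP gems i m → i ≤ s.toNat := by
        intro i him hci
        obtain ⟨g₀mem, _⟩ : g₀ ∈ gems ∧ True := by
          refine ⟨List.mem_iff_getElem?.mpr ⟨s.toNat, hsocc⟩, trivial⟩
        obtain ⟨t, htr, hit, hte⟩ := hci g₀ g₀mem
        simp only [List.mem_range] at htr
        rcases Nat.lt_or_ge s.toNat t with h | h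
        · exact absurd hte (hslast t h (by omega))
        · omega
      -- plumb the new best through
      rw [if_pos hsz, hs]
      have happly := fun best' hB' => ih (m + 1) (d.insert x (m : Int)) best' (by omega)
        hrest ⟨hD'last, hD'nd, hD'cont⟩ hB'
      obtain ⟨hBnone, hBsome⟩ := hB
      cases best with
      | none =>
        dsimp only
        rw [← hcast]
        apply happly
        constructor
        · intro h; cases h
        · intro L s₁ hLs
          have hinj := (Option.some.injEq _ _).mp hLs
          have hL : L = (m : Int) - s := (congrArg Prod.fst hinj).symm
          have hs₁ : s₁ = s := (congrArg Prod.snd hinj).symm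
          refine ⟨m, s.toNat, by omega, by omega, by omega, by omega, hcovcand, ?_⟩
          intro i k hik hkm1 hc
          rcases Nat.lt_or_ge k m with h | h
          · exact absurd (covP_anti_i hc (Nat.zero_le i)) (hBnone rfl k h)
          · have hkm : k = m := by omega
            subst hkm
            have := hcandmax i hik hc
            omega
      | some b =>
        obtain ⟨kkb, ssb, hb1, hb2, hb3, hb4, hb5, hb6⟩ := hBsome b.1 b.2 rfl
        dsimp only
        by_cases hlt : (m : Int) - s < b.1 ∨ ((m : Int) - s = b.1 ∧ s < b.2)
        · rw [if_pos hlt]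
          rw [← hcast]
          apply happly
          constructor
          · intro h; cases h
          · intro L s₁ hLs
            have hinj := (Option.some.injEq _ _).mp hLs
            have hL : L = (m : Int) - s := (congrArg Prod.fst hinj).symm
            have hs₁ : s₁ = s := (congrArg Prod.snd hinj).symm
            refine ⟨m, s.toNat, by omega, by omega, by omega, by omega, hcovcand, ?_⟩
            intro i k hik hkm1 hc
            rcases Nat.lt_or_ge k m with h | h
            · have h6 := hb6 i k hik h hc
              rw [hb1] at hlt
              rw [hb2] at hlt
              omega
            · have hkm : k = m := by omega
              subst hkm
              have := hcandmax i hik hc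
              omega
        · rw [if_neg hlt]
          rw [← hcast]
          apply happly
          constructor
          · intro h; cases h
          · intro L s₁ hLs
            have hinj := (Option.some.injEq _ _).mp hLs
            have hL : L = b.1 := (congrArg Prod.fst hinj).symm
            have hs₁ : s₁ = b.2 := (congrArg Prod.snd hinj).symm
            subst hL hs₁
            refine ⟨kkb, ssb, hb1, hb2, hb3, by omega, hb5, ?_⟩
            intro i k hik hkm1 hc
            rcases Nat.lt_or_ge k m with h | h
            · exact hb6 i k hik h hc
            · have hkm : k = m := by omega
              subst hkm
              have hmax := hcandmax i hik hc
              rw [hb1] at hlt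
              rw [hb2] at hlt
              omega
    · -- not all types seen yet: best unchanged
      rw [if_neg hsz]
      rw [← hcast]
      refine ih (m + 1) (d.insert x (m : Int)) best (by omega) hrest ⟨hD'last, hD'nd, hD'cont⟩ ?_
      obtain ⟨hBnone, hBsome⟩ := hB
      constructor
      · intro hb k hk
        rcases Nat.lt_or_ge k m with h | h
        · exact hBnone hb k h
        · have hkm : k = m := by omega
          rw [hkm]
          exact fun hc => hsz ((dict_size_iff hD'nd hD'cont).mpr hc)
      · intro L s hLs
        obtain ⟨kk, ss, h1, h2, h3, h4, h5, h6⟩ := hBsome L s hLs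
        refine ⟨kk, ss, h1, h2, h3, by omega, h5, ?_⟩
        intro i k hik hkm1 hc
        rcases Nat.lt_or_ge k m with h | h
        · exact h6 i k hik h hc
        · have hkm : k = m := by omega
          subst hkm
          exact absurd ((dict_size_iff hD'nd hD'cont).mpr (covP_anti_i hc (Nat.zero_le i))) hsz

theorem solutionB_best (gems : List String) (hne : gems ≠ []) (p : Nat × Nat)
    (hb : IsBest gems p) :
    solution_alt gems = [(p.2 : Int) + 1, (p.2 : Int) + (p.1 : Int) + 1] := by
  have hD0 : DInv gems 0 PySem.Dict.empty := by
    refine ⟨?_, ?_, ?_⟩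
    · intro g v h
      rw [PySem.Dict.get?_empty] at h
      cases h
    · rw [PySem.Dict.keys_empty]
      exact List.nodup_nil
    · intro g
      rw [PySem.Dict.contains_empty]
      simp
  have hB0 : BInv gems 0 none := by
    refine ⟨fun _ k hk => absurd hk (by omega), fun L s h => by cases h⟩
  have hinv := altloop_inv gems 0 PySem.Dict.empty none (Nat.zero_le _) List.drop_zero hD0 hB0
  have hnpos : 0 < gems.length := List.length_pos_iff.mpr hne
  unfold solution_alt
  dsimp only
  rw [show ((0 : Nat) : Int) = (0 : Int) from rfl] at hinv
  cases hres : solutionAltLoop (PySem.Set.len (PySem.Set.ofList gems))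
      (PySem.List.enumerate gems) PySem.Dict.empty none with
  | none =>
    exfalso
    rw [hres] at hinv
    exact hinv.1 rfl (gems.length - 1) (by omega) (covP_all hne)
  | some b =>
    rw [hres] at hinv
    obtain ⟨kk, ss, h1, h2, h3, h4, h5, h6⟩ := hinv.2 b.1 b.2 rfl
    obtain ⟨⟨hplt, hpcov⟩, hpmin⟩ := hb
    have ha := hpmin ss kk h3 h4 h5
    have hbb := h6 p.2 (p.2 + p.1) (by omega) hplt hpcov
    have hp : p.1 = kk - ss ∧ p.2 = ss := by omega
    dsimp only
    simp only [List.cons.injEq, and_true]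
    exact ⟨by omega, by omega⟩

-- ===== VERDICT (by name: the statement is the Claim_ definition above) =====
theorem solution_spec : Claim_equal_solution := by
  intro gems _ hpre
  obtain ⟨p, hbest, hA⟩ := solutionA_best gems hpre
  unfold Spec_solution
  rw [hA, solutionB_best gems hpre.1 p hbest]
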